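-- pv_equiv track=rewrite | github.com/trung0boy/code_hsg_11 | nghiên cứu đề/giải/chênh lệch lớn nhất O(n^4).py | sliver
-- ===== SOURCE A (Python) =====
-- def sliver(n,m,a,b): #  O(n^4)
--     res=0
--     for i in range(n):
--         mxA=0               # GT lớn nhất của A[k+1] - A[k]
--         for j in range(i,n):
--             if j != i:
--                 mxA = max(mxA, abs(a[j] - a[j-1]) )
--             for u in range(n):
--                 mxB =0           # GT lớn nhất của B[k+1] - B[k]
--                 for v in range(u,n):
--                     if u != v:
--                         mxB = max(mxB, abs(b[v] - b[v-1]) )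
--                     if (j-i+1)+(v-u+1)==m and a[j] <  b[u] :
--                         res = max(res, mxA, mxB, abs(a[j] - b[u]))
--     return res
-- ===== SOURCE B (Python) =====
-- def sliver(n, m, a, b):
--     # O(n^2): a valid pair splits m into window lengths La + Lb = m, La,Lb >= 1.
--     # For a fixed end j of the a-window and start u of the b-window, the adjacent-diff
--     # maxima are monotone in the window length, so only the extreme lengths matter:
--     # the a-window may be grown to width min(j+1, m-1) and the b-window to width
--     # min(n-u, m-1); any split exists iff (j+1)+(n-u) >= m.
--     if m < 2:
--         return 0
--     wa = []   # wa[j] = max |a[k]-a[k-1]| over the widest usable a-window ending at j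
--     for j in range(n):
--         cur = 0
--         for k in range(max(1, j - m + 3), j + 1):
--             cur = max(cur, abs(a[k] - a[k-1]))
--         wa.append(cur)
--     wb = []   # wb[u] = max |b[k]-b[k-1]| over the widest usable b-window starting at u
--     for u in range(n):
--         cur = 0
--         for k in range(u + 1, min(n, u + m - 1)):
--             cur = max(cur, abs(b[k] - b[k-1]))
--         wb.append(cur)
--     res = 0
--     for j in range(n):
--         for u in range(n):
--             if a[j] < b[u] and (j + 1) + (n - u) >= m:
--                 res = max(res, wa[j], wb[u], b[u] - a[j])
--     return res
-- ===== Notes on version B (the rewrite author's own statement) =====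
-- stated objective: faster
-- what changed: Instead of enumerating all O(n^4) subarray pairs with running maxima, B notes that for a fixed a-window end j and b-window start u the adjacent-diff maxima are monotone in window length, so only the extreme lengths of the split of m matter; it precomputes one widest-window diff-maximum per end j and per start u and then scans the O(n^2) (j,u) pairs once.
-- outside the precondition, e.g. on sliver(1, 9, [14, 1, 1, 5, 2], []): A returns 0, B raises IndexError
import Mathlib
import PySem

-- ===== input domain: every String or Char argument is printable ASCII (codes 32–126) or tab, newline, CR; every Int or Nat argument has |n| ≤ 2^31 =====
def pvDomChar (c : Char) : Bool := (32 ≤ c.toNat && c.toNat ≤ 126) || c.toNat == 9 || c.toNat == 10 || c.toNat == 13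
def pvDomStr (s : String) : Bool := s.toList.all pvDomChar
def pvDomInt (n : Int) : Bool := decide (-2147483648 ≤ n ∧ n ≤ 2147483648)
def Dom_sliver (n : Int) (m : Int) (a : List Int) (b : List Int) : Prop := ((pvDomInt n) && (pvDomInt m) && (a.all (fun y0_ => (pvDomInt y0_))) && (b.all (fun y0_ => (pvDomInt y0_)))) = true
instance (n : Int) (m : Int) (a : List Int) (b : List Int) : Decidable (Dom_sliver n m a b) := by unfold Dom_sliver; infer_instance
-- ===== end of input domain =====

-- B replaces A's O(n^4) scan of all subarray pairs by an O(n^2) scan of (end-of-a-window, start-of-b-window)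
-- pairs, exploiting monotonicity of the adjacent-difference maximum in the window length (objective: faster).

-- ===== PORT A =====
def sliver (n : Int) (m : Int) (a : List Int) (b : List Int) : Int :=
  (PySem.List.pyRange 0 n 1).foldl (fun res i =>
    ((PySem.List.pyRange i n 1).foldl (fun (s : Int × Int) j =>
      let mxA := if j ≠ i then max s.2 |PySem.List.pyGetD a j 0 - PySem.List.pyGetD a (j - 1) 0| else s.2
      let res :=
        (PySem.List.pyRange 0 n 1).foldl (fun res u =>
          ((PySem.List.pyRange u n 1).foldl (fun (t : Int × Int) v =>
            let mxB := if u ≠ v then max t.2 |PySem.List.pyGetD b v 0 - PySem.List.pyGetD b (v - 1) 0| else t.2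
            let res :=
              if (j - i + 1) + (v - u + 1) = m ∧ PySem.List.pyGetD a j 0 < PySem.List.pyGetD b u 0 then
                max (max (max t.1 mxA) mxB) |PySem.List.pyGetD a j 0 - PySem.List.pyGetD b u 0|
              else t.1
            (res, mxB)) (res, 0)).1) s.1
      (res, mxA)) (res, 0)).1) 0

-- ===== PORT B =====
def sliver_alt (n : Int) (m : Int) (a : List Int) (b : List Int) : Int :=
  if m < 2 then 0
  else
    let wa : List Int :=
      (PySem.List.pyRange 0 n 1).foldl (fun wa j =>
        wa ++ [(PySem.List.pyRange (max 1 (j - m + 3)) (j + 1) 1).foldl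
                 (fun cur k => max cur |PySem.List.pyGetD a k 0 - PySem.List.pyGetD a (k - 1) 0|) 0]) []
    let wb : List Int :=
      (PySem.List.pyRange 0 n 1).foldl (fun wb u =>
        wb ++ [(PySem.List.pyRange (u + 1) (min n (u + m - 1)) 1).foldl
                 (fun cur k => max cur |PySem.List.pyGetD b k 0 - PySem.List.pyGetD b (k - 1) 0|) 0]) []
    (PySem.List.pyRange 0 n 1).foldl (fun res j =>
      (PySem.List.pyRange 0 n 1).foldl (fun res u =>
        if PySem.List.pyGetD a j 0 < PySem.List.pyGetD b u 0 ∧ (j + 1) + (n - u) ≥ m then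
          max (max (max res (PySem.List.pyGetD wa j 0)) (PySem.List.pyGetD wb u 0))
            (PySem.List.pyGetD b u 0 - PySem.List.pyGetD a j 0)
        else res) res) 0

-- ===== PRECONDITION & SPEC =====
-- Pre_ excludes the inputs with fewer than n elements in a or b: there A normally raises IndexError, and on
-- the few where A still returns 0 (its short-circuit never reaches the out-of-range b[u] because no length
-- split matches m) the natural B raises IndexError instead.
def Pre_sliver (n : Int) (m : Int) (a : List Int) (b : List Int) : Prop :=
  n ≤ (a.length : Int) ∧ n ≤ (b.length : Int)
instance (n : Int) (m : Int) (a : List Int) (b : List Int) : Decidable (Pre_sliver n m a b) := by unfold Pre_sliver; infer_instance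
def pvWitness_sliver : Int × Int × List Int × List Int := (3, 3, [4, 0, 2], [1, 7, 5])
def Spec_sliver (n : Int) (m : Int) (a : List Int) (b : List Int) (out : Int) : Prop := out = sliver_alt n m a b
instance (n : Int) (m : Int) (a : List Int) (b : List Int) (out : Int) : Decidable (Spec_sliver n m a b out) := by unfold Spec_sliver; infer_instance

-- ===== CLAIM (what is proved, stated in full; the proofs are below) =====
def Claim_equal_sliver : Prop := ∀ (n : Int) (m : Int) (a : List Int) (b : List Int), Dom_sliver n m a b → Pre_sliver n m a b → Spec_sliver n m a b (sliver n m a b)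

-- ===== LEMMAS AND PROOFS =====

-- list element with default 0 (= the ports' pyGetD)
def gd (l : List Int) (i : Int) : Int := PySem.List.pyGetD l i 0

-- running maximum of d over [s, t), starting from 0
def dmg (d : Int → Int) (s t : Int) : Int :=
  (PySem.List.pyRange s t 1).foldl (fun c k => max c (d k)) 0

-- max adjacent difference of l over diff indices in [s, t)
def dmax (l : List Int) (s t : Int) : Int := dmg (fun k => |gd l k - gd l (k - 1)|) s t

-- candidate value of the quadruple (i, j, u, v)
def cand (a b : List Int) (i j u v : Int) : Int :=
  max (max (dmax a (i + 1) (j + 1)) (dmax b (u + 1) (v + 1))) |gd a j - gd b u|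

def cands (n m : Int) (a b : List Int) : List Int :=
  (PySem.List.pyRange 0 n 1).flatMap (fun i =>
    (PySem.List.pyRange i n 1).flatMap (fun j =>
      (PySem.List.pyRange 0 n 1).flatMap (fun u =>
        ((PySem.List.pyRange u n 1).filter
            (fun v => decide ((j - i + 1) + (v - u + 1) = m ∧ gd a j < gd b u))).map
          (cand a b i j u))))

-- candidate value of B's pair (j, u)
def pc (n m : Int) (a b : List Int) (j u : Int) : Int :=
  max (max (dmax a (max 1 (j - m + 3)) (j + 1)) (dmax b (u + 1) (min n (u + m - 1))))
    (gd b u - gd a j)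

def pcands (n m : Int) (a b : List Int) : List Int :=
  (PySem.List.pyRange 0 n 1).flatMap (fun j =>
    ((PySem.List.pyRange 0 n 1).filter
        (fun u => decide (gd a j < gd b u ∧ (j + 1) + (n - u) ≥ m))).map
      (pc n m a b j))

lemma dmg_nil (d : Int → Int) (s t : Int) (h : t ≤ s) : dmg d s t = 0 := by
  simp [dmg, PySem.List.pyRange_one_eq_nil h]

lemma dmg_succ (d : Int → Int) (s t : Int) (h : s ≤ t) :
    dmg d s (t + 1) = max (dmg d s t) (d t) := by
  simp [dmg, PySem.List.pyRange_one_succ_right h, List.foldl_append]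

lemma dmg_nonneg (d : Int → Int) (s t : Int) : 0 ≤ dmg d s t :=
  (PySem.List.le_foldl_max_int _ _ _).1

lemma le_dmg (d : Int → Int) (s t k : Int) (h1 : s ≤ k) (h2 : k < t) : d k ≤ dmg d s t :=
  (PySem.List.le_foldl_max_int _ _ _).2 k (by rw [PySem.List.mem_pyRange_one]; omega)

lemma foldl_max_proj_le {α : Type} (xs : List α) (f : α → Int) (init c : Int)
    (h0 : init ≤ c) (h : ∀ x ∈ xs, f x ≤ c) :
    xs.foldl (fun acc x => max acc (f x)) init ≤ c := by
  induction xs generalizing init with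
  | nil => exact h0
  | cons y ys ih =>
      exact ih _ (max_le h0 (h y (by simp))) (fun x hx => h x (by simp [hx]))

lemma dmg_mono (d : Int → Int) (s s' t t' : Int) (hs : s' ≤ s) (ht : t ≤ t') :
    dmg d s t ≤ dmg d s' t' := by
  unfold dmg
  refine foldl_max_proj_le _ _ _ _ (dmg_nonneg d s' t') ?_
  intro k hk
  rw [PySem.List.mem_pyRange_one] at hk
  exact le_dmg d s' t' k (by omega) (by omega)

lemma foldl_max_le (xs : List Int) (init c : Int) (h0 : init ≤ c) (h : ∀ x ∈ xs, x ≤ c) :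
    xs.foldl max init ≤ c := by
  induction xs generalizing init with
  | nil => exact h0
  | cons y ys ih => exact ih _ (max_le h0 (h y (by simp))) (fun x hx => h x (by simp [hx]))

lemma foldl_max_flatMap {α : Type} (l : List α) (g : α → List Int) (r : Int) :
    l.foldl (fun res x => (g x).foldl max res) r = (l.flatMap g).foldl max r := by
  induction l generalizing r with
  | nil => simp
  | cons y ys ih => simp [List.flatMap_cons, List.foldl_append, ih]

-- the running-max pair loop, in general form
lemma pairfold_G (d : Int → Int) (f : Int → Int → Int → Int) (s : Int) (c : Int → Prop)
    [DecidablePred c] (hc : ∀ k, c k ↔ k ≠ s) (dN : Nat) (res : Int) :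
    (PySem.List.pyRange s (s + dN) 1).foldl
      (fun (p : Int × Int) k =>
        (f p.1 (if c k then max p.2 (d k) else p.2) k,
         if c k then max p.2 (d k) else p.2))
      (res, 0)
    = ((PySem.List.pyRange s (s + dN) 1).foldl
        (fun r k => f r (dmg d (s + 1) (k + 1)) k) res,
       dmg d (s + 1) (s + dN)) := by
  induction dN generalizing res with
  | zero =>
      simp [PySem.List.pyRange_one_eq_nil (le_refl s), dmg_nil d (s + 1) s (by omega)]
  | succ dN ih =>
      have hcast : (s + (dN + 1 : Nat) : Int) = (s + dN) + 1 := by push_cast; ring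
      rw [hcast, PySem.List.pyRange_one_succ_right (by omega : s ≤ s + (dN : Int)),
          List.foldl_append, List.foldl_append, ih]
      have hmx : (if c (s + (dN : Int)) then max (dmg d (s + 1) (s + dN)) (d (s + dN))
                  else dmg d (s + 1) (s + dN)) = dmg d (s + 1) (s + dN + 1) := by
        rcases Nat.eq_zero_or_pos dN with h0 | hpos
        · subst h0
          rw [if_neg (fun h => ((hc _).mp h) (by push_cast; ring))]
          rw [dmg_nil d (s + 1) (s + ((0 : Nat) : Int)) (by omega),
              dmg_nil d (s + 1) (s + ((0 : Nat) : Int) + 1) (by omega)]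
        · rw [if_pos ((hc _).mpr (by omega)), dmg_succ d (s + 1) (s + dN) (by omega)]
      simp only [List.foldl_cons, List.foldl_nil, hmx]

lemma pairfold_G' (d : Int → Int) (f : Int → Int → Int → Int) (s t : Int) (c : Int → Prop)
    [DecidablePred c] (hc : ∀ k, c k ↔ k ≠ s) (h : s ≤ t) (res : Int) :
    (PySem.List.pyRange s t 1).foldl
      (fun (p : Int × Int) k =>
        (f p.1 (if c k then max p.2 (d k) else p.2) k,
         if c k then max p.2 (d k) else p.2))
      (res, 0)
    = ((PySem.List.pyRange s t 1).foldl
        (fun r k => f r (dmg d (s + 1) (k + 1)) k) res,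
       dmg d (s + 1) t) := by
  obtain ⟨dN, rfl⟩ : ∃ dN : Nat, t = s + dN := ⟨(t - s).toNat, by omega⟩
  exact pairfold_G d f s c hc dN res

-- A computes the fold of max over all quadruple candidates
lemma sliver_eq_cands (n m : Int) (a b : List Int) :
    sliver n m a b = (cands n m a b).foldl max 0 := by
  have hVG : ∀ (i j u mx res : Int), u ≤ n →
      ((PySem.List.pyRange u n 1).foldl (fun (t : Int × Int) v =>
          (if (j - i + 1) + (v - u + 1) = m ∧ gd a j < gd b u then
              max (max (max t.1 mx) (if u ≠ v then max t.2 |gd b v - gd b (v - 1)| else t.2))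
                |gd a j - gd b u|
            else t.1,
           if u ≠ v then max t.2 |gd b v - gd b (v - 1)| else t.2)) (res, 0)).1
      = (PySem.List.pyRange u n 1).foldl (fun r v =>
          if (j - i + 1) + (v - u + 1) = m ∧ gd a j < gd b u then
            max (max (max r mx) (dmg (fun k => |gd b k - gd b (k - 1)|) (u + 1) (v + 1)))
              |gd a j - gd b u|
          else r) res := by
    intro i j u mx res hu
    exact congrArg Prod.fst
      (pairfold_G' (fun k => |gd b k - gd b (k - 1)|)
        (fun r mxB v =>
          if (j - i + 1) + (v - u + 1) = m ∧ gd a j < gd b u then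
            max (max (max r mx) mxB) |gd a j - gd b u|
          else r)
        u n (fun v => u ≠ v) (fun k => ne_comm) hu res)
  unfold sliver cands
  refine (PySem.List.foldl_congr_mem _ _ _ _ ?_).trans (foldl_max_flatMap _ _ 0)
  intro res i hi
  rw [PySem.List.mem_pyRange_one] at hi
  refine (congrArg Prod.fst
      (pairfold_G' (fun k => |gd a k - gd a (k - 1)|)
        (fun r mx j =>
          (PySem.List.pyRange 0 n 1).foldl (fun res u =>
            ((PySem.List.pyRange u n 1).foldl (fun (t : Int × Int) v =>
                (if (j - i + 1) + (v - u + 1) = m ∧ gd a j < gd b u then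
                    max (max (max t.1 mx)
                        (if u ≠ v then max t.2 |gd b v - gd b (v - 1)| else t.2))
                      |gd a j - gd b u|
                  else t.1,
                 if u ≠ v then max t.2 |gd b v - gd b (v - 1)| else t.2)) (res, 0)).1) r)
        i n (fun j => j ≠ i) (fun k => Iff.rfl) (by omega) res)).trans ?_
  refine (PySem.List.foldl_congr_mem _ _ _ _ ?_).trans (foldl_max_flatMap _ _ res)
  intro r j hj
  rw [PySem.List.mem_pyRange_one] at hj
  refine (PySem.List.foldl_congr_mem _ _ _ _ ?_).trans (foldl_max_flatMap _ _ r)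
  intro r' u hu
  rw [PySem.List.mem_pyRange_one] at hu
  refine (hVG i j u _ r' (by omega)).trans ?_
  rw [PySem.List.foldl_ite_eq_foldl_filter, List.foldl_map]
  refine PySem.List.foldl_congr_mem _ _ _ _ ?_
  intro acc v hv
  rw [List.mem_filter] at hv
  have hP := of_decide_eq_true hv.2
  simp [hP, cand, dmax, max_assoc]

-- B computes the fold of max over all pair candidates (for m ≥ 2)
lemma sliver_alt_eq_pcands (n m : Int) (a b : List Int) (hm : ¬ m < 2) :
    sliver_alt n m a b = (pcands n m a b).foldl max 0 := by
  unfold sliver_alt pcands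
  rw [if_neg hm]
  have hwa : (PySem.List.pyRange 0 n 1).foldl (fun wa j =>
        wa ++ [(PySem.List.pyRange (max 1 (j - m + 3)) (j + 1) 1).foldl
                 (fun cur k => max cur |PySem.List.pyGetD a k 0 - PySem.List.pyGetD a (k - 1) 0|) 0]) []
      = (PySem.List.pyRange 0 n 1).map (fun j =>
          (PySem.List.pyRange (max 1 (j - m + 3)) (j + 1) 1).foldl
            (fun cur k => max cur |PySem.List.pyGetD a k 0 - PySem.List.pyGetD a (k - 1) 0|) 0) := by
    simpa using PySem.List.foldl_append_singleton_eq_map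
      (f := fun j => (PySem.List.pyRange (max 1 (j - m + 3)) (j + 1) 1).foldl
        (fun cur k => max cur |PySem.List.pyGetD a k 0 - PySem.List.pyGetD a (k - 1) 0|) 0)
      (l := PySem.List.pyRange 0 n 1) (acc := [])
  have hwb : (PySem.List.pyRange 0 n 1).foldl (fun wb u =>
        wb ++ [(PySem.List.pyRange (u + 1) (min n (u + m - 1)) 1).foldl
                 (fun cur k => max cur |PySem.List.pyGetD b k 0 - PySem.List.pyGetD b (k - 1) 0|) 0]) []
      = (PySem.List.pyRange 0 n 1).map (fun u =>
          (PySem.List.pyRange (u + 1) (min n (u + m - 1)) 1).foldl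
            (fun cur k => max cur |PySem.List.pyGetD b k 0 - PySem.List.pyGetD b (k - 1) 0|) 0) := by
    simpa using PySem.List.foldl_append_singleton_eq_map
      (f := fun u => (PySem.List.pyRange (u + 1) (min n (u + m - 1)) 1).foldl
        (fun cur k => max cur |PySem.List.pyGetD b k 0 - PySem.List.pyGetD b (k - 1) 0|) 0)
      (l := PySem.List.pyRange 0 n 1) (acc := [])
  rw [hwa, hwb]
  refine (PySem.List.foldl_congr_mem _ _ _ _ ?_).trans (foldl_max_flatMap _ _ 0)
  intro res j hj
  rw [PySem.List.mem_pyRange_one] at hj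
  refine (PySem.List.foldl_congr_mem _ _
      (fun res u => if gd a j < gd b u ∧ (j + 1) + (n - u) ≥ m
        then max res (pc n m a b j u) else res) _ ?_).trans ?_
  · intro acc u hu
    rw [PySem.List.mem_pyRange_one] at hu
    rw [PySem.List.pyGetD_map_pyRange_of_nonneg _ n j 0 (by omega) (by omega),
        PySem.List.pyGetD_map_pyRange_of_nonneg _ n u 0 (by omega) (by omega)]
    by_cases hc : PySem.List.pyGetD a j 0 < PySem.List.pyGetD b u 0 ∧ (j + 1) + (n - u) ≥ m
    · simp [hc, pc, dmax, dmg, gd, max_assoc]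
    · simp [hc, gd]
  · rw [PySem.List.foldl_ite_eq_foldl_filter, List.foldl_map]

lemma mem_cands {n m : Int} {a b : List Int} {x : Int} :
    x ∈ cands n m a b ↔ ∃ i j u v : Int,
      (0 ≤ i ∧ i < n) ∧ (i ≤ j ∧ j < n) ∧ (0 ≤ u ∧ u < n) ∧ (u ≤ v ∧ v < n) ∧
      (j - i + 1) + (v - u + 1) = m ∧ gd a j < gd b u ∧ x = cand a b i j u v := by
  simp only [cands, List.mem_flatMap, List.mem_map, List.mem_filter,
    PySem.List.mem_pyRange_one, decide_eq_true_eq]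
  constructor
  · rintro ⟨i, hi, j, hj, u, hu, v, ⟨hv, hc1, hc2⟩, hx⟩
    exact ⟨i, j, u, v, hi, hj, hu, hv, hc1, hc2, hx.symm⟩
  · rintro ⟨i, j, u, v, hi, hj, hu, hv, hc1, hc2, hx⟩
    exact ⟨i, hi, j, hj, u, hu, v, ⟨hv, hc1, hc2⟩, hx.symm⟩

lemma mem_pcands {n m : Int} {a b : List Int} {x : Int} :
    x ∈ pcands n m a b ↔ ∃ j u : Int,
      (0 ≤ j ∧ j < n) ∧ (0 ≤ u ∧ u < n) ∧
      gd a j < gd b u ∧ (j + 1) + (n - u) ≥ m ∧ x = pc n m a b j u := by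
  simp only [pcands, List.mem_flatMap, List.mem_map, List.mem_filter,
    PySem.List.mem_pyRange_one, decide_eq_true_eq]
  constructor
  · rintro ⟨j, hj, u, ⟨hu, hc1, hc2⟩, hx⟩
    exact ⟨j, u, hj, hu, hc1, hc2, hx.symm⟩
  · rintro ⟨j, u, hj, hu, hc1, hc2, hx⟩
    exact ⟨j, hj, u, ⟨hu, hc1, hc2⟩, hx.symm⟩

lemma cands_nil_of_m_lt_two (n m : Int) (a b : List Int) (hm : m < 2) :
    cands n m a b = [] := by
  rw [List.eq_nil_iff_forall_not_mem]
  intro x hx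
  rw [mem_cands] at hx
  obtain ⟨i, j, u, v, hi, hj, hu, hv, hc1, _, _⟩ := hx
  omega

lemma cand_le_pc (n m : Int) (a b : List Int) (i j u v : Int)
    (hi : 0 ≤ i) (hv : v < n) (hlb : u ≤ v) (hla : i ≤ j)
    (hsum : (j - i + 1) + (v - u + 1) = m) (hlt : gd a j < gd b u) :
    cand a b i j u v ≤ pc n m a b j u := by
  have h1 : dmax a (i + 1) (j + 1) ≤ dmax a (max 1 (j - m + 3)) (j + 1) :=
    dmg_mono _ _ _ _ _ (by omega) (by omega)
  have h2 : dmax b (u + 1) (v + 1) ≤ dmax b (u + 1) (min n (u + m - 1)) :=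
    dmg_mono _ _ _ _ _ (by omega) (by omega)
  have h3 : |gd a j - gd b u| = gd b u - gd a j := by
    rw [abs_of_neg (by omega)]; ring
  unfold cand pc
  rw [h3]
  exact max_le_max (max_le_max h1 h2) (le_refl _)

-- ===== VERDICT (by name: the statement is the Claim_ definition above) =====
theorem sliver_spec : Claim_equal_sliver := by
  intro n m a b _hd _hp
  unfold Spec_sliver
  by_cases hm : m < 2
  · rw [sliver_eq_cands, cands_nil_of_m_lt_two n m a b hm]
    simp [sliver_alt, hm]
  · rw [sliver_eq_cands, sliver_alt_eq_pcands n m a b hm]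
    have hc0 : (0 : Int) ≤ (cands n m a b).foldl max 0 := (PySem.List.le_foldl_max _ _).1
    have hp0 : (0 : Int) ≤ (pcands n m a b).foldl max 0 := (PySem.List.le_foldl_max _ _).1
    apply le_antisymm
    · refine foldl_max_le _ _ _ hp0 ?_
      intro x hx
      rw [mem_cands] at hx
      obtain ⟨i, j, u, v, hi, hj, hu, hv, hsum, hlt, rfl⟩ := hx
      refine (cand_le_pc n m a b i j u v hi.1 hv.2 hv.1 hj.1 hsum hlt).trans
        ((PySem.List.le_foldl_max _ _).2 _ ?_)
      rw [mem_pcands]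
      exact ⟨j, u, ⟨by omega, hj.2⟩, hu, hlt, by omega, rfl⟩
    · refine foldl_max_le _ _ _ hc0 ?_
      intro x hx
      rw [mem_pcands] at hx
      obtain ⟨j, u, hj, hu, hlt, hge, rfl⟩ := hx
      have hmem := (PySem.List.le_foldl_max (cands n m a b) 0).2
      have habs : |gd a j - gd b u| = gd b u - gd a j := by
        rw [abs_of_neg (by omega)]; ring
      have hwad : dmax a (max 1 (j - m + 3)) (j + 1) ≤ (cands n m a b).foldl max 0 ∧
          gd b u - gd a j ≤ (cands n m a b).foldl max 0 := by
        have hi0 : max 1 (j - m + 3) = (max 0 (j - m + 2)) + 1 := by omega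
        set i0 := max 0 (j - m + 2) with hi0def
        set v0 := u + (m - (j - i0 + 1)) - 1 with hv0def
        have hq : cand a b i0 j u v0 ∈ cands n m a b := by
          rw [mem_cands]
          exact ⟨i0, j, u, v0, ⟨by omega, by omega⟩, ⟨by omega, by omega⟩, hu,
            ⟨by omega, by omega⟩, by omega, hlt, rfl⟩
        constructor
        · refine le_trans ?_ (hmem _ hq)
          rw [hi0]
          exact le_trans (le_max_left _ _) (le_max_left _ _)
        · refine le_trans ?_ (hmem _ hq)
          rw [← habs]
          exact le_max_right _ _
      have hwb : dmax b (u + 1) (min n (u + m - 1)) ≤ (cands n m a b).foldl max 0 := by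
        have hv1 : min n (u + m - 1) = (u + (min (n - u) (m - 1)) - 1) + 1 := by omega
        set lb := min (n - u) (m - 1) with hlbdef
        set v1 := u + lb - 1 with hv1def
        set i1 := j - (m - lb) + 1 with hi1def
        have hq : cand a b i1 j u v1 ∈ cands n m a b := by
          rw [mem_cands]
          exact ⟨i1, j, u, v1, ⟨by omega, by omega⟩, ⟨by omega, by omega⟩, hu,
            ⟨by omega, by omega⟩, by omega, hlt, rfl⟩
        refine le_trans ?_ (hmem _ hq)
        rw [hv1]
        exact le_trans (le_max_right _ _) (le_max_left _ _)
      exact max_le (max_le hwad.1 hwb) hwad.2
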